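-- pv_equiv track=rewrite | github.com/wawiesel/olm | scale/olm/build.py | __generate_thinned_list
-- ===== SOURCE A (Python) =====
-- def __generate_thinned_list(keep_every, y_list, always_keep_ends=True):
--     """Generate a thinned list using every point (1), every other point (2),
--     every third point (3), etc."""
--
--     if not keep_every > 0:
--         raise ValueError(
--             "The thinning parameter keep_every={keep_every} must be an integer >0!"
--         )
--
--     thinned_list = list()
--     j = 0
--     rm = 1
--     for y in y_list:
--         if always_keep_ends and (j == 0 or j == len(y_list) - 1):
--             p = True
--         elif rm >= keep_every:
--             p = True
--         else:
--             p = False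
--         if p:
--             thinned_list.append(y)
--             rm = 0
--         rm += 1
--         j += 1
--     return thinned_list
-- ===== SOURCE B (Python) =====
-- def __generate_thinned_list(keep_every, y_list, always_keep_ends=True):
--     """Thin a list: keep every keep_every-th point (plus both ends when
--     always_keep_ends). Stateless rewrite: the kept indices are computed by
--     modular arithmetic instead of a resetting counter."""
--     if not keep_every > 0:
--         raise ValueError(
--             "The thinning parameter keep_every={keep_every} must be an integer >0!"
--         )
--     n = len(y_list)
--     if always_keep_ends:
--         keep = lambda j: j % keep_every == 0 or j == n - 1
--     else:
--         keep = lambda j: (j + 1) % keep_every == 0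
--     return [y for j, y in enumerate(y_list) if keep(j)]
-- ===== Notes on version B (the rewrite author's own statement) =====
-- stated objective: simpler
-- what changed: Replaces the stateful pass that maintains a resetting counter rm and index j with a stateless comprehension over enumerate that keeps exactly the indices given by a closed-form modular predicate (j % k == 0 or j == n-1 with ends, (j+1) % k == 0 without).
import Mathlib
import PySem

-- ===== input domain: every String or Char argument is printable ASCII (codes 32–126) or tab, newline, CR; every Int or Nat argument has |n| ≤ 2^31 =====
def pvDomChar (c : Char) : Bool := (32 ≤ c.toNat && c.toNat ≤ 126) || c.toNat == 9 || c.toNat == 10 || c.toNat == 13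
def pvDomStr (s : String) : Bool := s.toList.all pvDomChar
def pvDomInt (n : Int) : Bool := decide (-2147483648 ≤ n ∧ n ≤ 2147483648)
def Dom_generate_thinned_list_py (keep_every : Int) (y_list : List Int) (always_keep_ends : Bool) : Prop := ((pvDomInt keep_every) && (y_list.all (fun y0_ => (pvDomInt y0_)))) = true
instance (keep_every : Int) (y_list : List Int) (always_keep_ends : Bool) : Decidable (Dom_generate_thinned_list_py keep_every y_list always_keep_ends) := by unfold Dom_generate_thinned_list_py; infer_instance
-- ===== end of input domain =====

-- B replaces A's single pass with a resetting counter by a stateless filter whose kept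
-- indices are given by modular arithmetic (objective: simpler).

-- ===== PORT A =====
-- the for-loop of A, carrying the list state (emitted via cons), the index j and the counter rm
def pvALoop (keep_every n : Int) (always_keep_ends : Bool) : List Int → Int → Int → List Int
  | [], _, _ => []
  | y :: ys, j, rm =>
    let p : Bool :=
      if always_keep_ends && (j == 0 || j == n - 1) then true
      else if keep_every ≤ rm then true else false
    if p then y :: pvALoop keep_every n always_keep_ends ys (j + 1) 1
    else pvALoop keep_every n always_keep_ends ys (j + 1) (rm + 1)

def generate_thinned_list_py (keep_every : Int) (y_list : List Int) (always_keep_ends : Bool) : List Int :=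
  -- 'if not keep_every > 0: raise ValueError' is excluded by Pre_generate_thinned_list_py
  pvALoop keep_every (y_list.length : Int) always_keep_ends y_list 0 1

-- ===== PORT B =====
def generate_thinned_list_py_alt (keep_every : Int) (y_list : List Int) (always_keep_ends : Bool) : List Int :=
  let n : Int := y_list.length
  let keep : Int → Bool :=
    if always_keep_ends then fun j => PySem.Int.mod j keep_every == 0 || j == n - 1
    else fun j => PySem.Int.mod (j + 1) keep_every == 0
  ((PySem.List.enumerate y_list 0).filter (fun jy => keep jy.1)).map Prod.snd

-- ===== PRECONDITION & SPEC =====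
-- Pre_ excludes keep_every ≤ 0, on which A raises ValueError.
def Pre_generate_thinned_list_py (keep_every : Int) (y_list : List Int) (always_keep_ends : Bool) : Prop := 0 < keep_every
instance (keep_every : Int) (y_list : List Int) (always_keep_ends : Bool) : Decidable (Pre_generate_thinned_list_py keep_every y_list always_keep_ends) := by unfold Pre_generate_thinned_list_py; infer_instance

def pvWitness_generate_thinned_list_py : Int × List Int × Bool := (2, [1, 2, 3, 4, 5], true)

def Spec_generate_thinned_list_py (keep_every : Int) (y_list : List Int) (always_keep_ends : Bool) (out : List Int) : Prop := out = generate_thinned_list_py_alt keep_every y_list always_keep_ends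
instance (keep_every : Int) (y_list : List Int) (always_keep_ends : Bool) (out : List Int) : Decidable (Spec_generate_thinned_list_py keep_every y_list always_keep_ends out) := by unfold Spec_generate_thinned_list_py; infer_instance

-- ===== CLAIM (what is proved, stated in full; the proofs are below) =====
def Claim_equal_generate_thinned_list_py : Prop := ∀ (keep_every : Int) (y_list : List Int) (always_keep_ends : Bool), Dom_generate_thinned_list_py keep_every y_list always_keep_ends → Pre_generate_thinned_list_py keep_every y_list always_keep_ends → Spec_generate_thinned_list_py keep_every y_list always_keep_ends (generate_thinned_list_py keep_every y_list always_keep_ends)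

-- ===== LEMMAS AND PROOFS =====

-- the counter step, arithmetically: (j+1) % k hits 0 exactly when the counter reaches k,
-- and otherwise advances by one
lemma pv_mod_succ (k j : Int) (hk : 0 < k) :
    ((j + 1) % k = 0 ↔ k ≤ j % k + 1) ∧ ((j + 1) % k ≠ 0 → (j + 1) % k = j % k + 1) := by
  have hr0 : 0 ≤ j % k := Int.emod_nonneg j (ne_of_gt hk)
  have hrk : j % k < k := Int.emod_lt_of_pos j hk
  have key : (j + 1) % k = (j % k + 1) % k := by
    conv_lhs => rw [← Int.emod_add_mul_ediv j k]
    rw [show j % k + k * (j / k) + 1 = (j % k + 1) + j / k * k by ring,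
        Int.add_mul_emod_self_right]
  by_cases h : j % k + 1 = k
  · rw [key, h]; simp
  · have hself : (j % k + 1) % k = j % k + 1 := Int.emod_eq_of_lt (by omega) (by omega)
    rw [key, hself]; omega

lemma pvB_false (k n : Int) (hk : 0 < k) :
    ∀ (ys : List Int) (j : Int), 0 ≤ j →
      pvALoop k n false ys j (j % k + 1) =
        ((PySem.List.enumerate ys j).filter
            (fun jy => PySem.Int.mod (jy.1 + 1) k == 0)).map Prod.snd := by
  intro ys
  induction ys with
  | nil => intro j _; simp [pvALoop, PySem.List.enumerate_nil]
  | cons y ys ih =>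
    intro j hj
    have hmod := pv_mod_succ k j hk
    have hmm : PySem.Int.mod (j + 1) k = (j + 1) % k := PySem.Int.mod_eq_emod_of_pos hk
    rw [PySem.List.enumerate_cons]
    by_cases hc : (j + 1) % k = 0
    · have hp : k ≤ j % k + 1 := hmod.1.mp hc
      have ih' := ih (j + 1) (by omega)
      rw [hc] at ih'
      norm_num at ih'
      simp [pvALoop, hp, hmm, hc, ih']
    · have hp : ¬ k ≤ j % k + 1 := fun h => hc (hmod.1.mpr h)
      have ih' := ih (j + 1) (by omega)
      rw [hmod.2 hc] at ih'
      simp [pvALoop, hp, hmm, hc, ih']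

lemma pvB_true (k n : Int) (hk : 0 < k) :
    ∀ (ys : List Int) (j : Int), 1 ≤ j → j + (ys.length : Int) = n →
      pvALoop k n true ys j ((j - 1) % k + 1) =
        ((PySem.List.enumerate ys j).filter
            (fun jy => PySem.Int.mod jy.1 k == 0 || jy.1 == n - 1)).map Prod.snd := by
  intro ys
  induction ys with
  | nil => intro j _ _; simp [pvALoop, PySem.List.enumerate_nil]
  | cons y ys ih =>
    intro j hj hlen
    have hmod := pv_mod_succ k (j - 1) hk
    rw [show j - 1 + 1 = j by ring] at hmod
    have hmm : PySem.Int.mod j k = j % k := PySem.Int.mod_eq_emod_of_pos hk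
    rw [PySem.List.enumerate_cons]
    by_cases hend : j = n - 1
    · -- last element: kept by both; the tail is empty
      have hys : ys = [] := by
        have : (ys.length : Int) = 0 := by simp at hlen; omega
        simpa using this
      subst hys
      simp [pvALoop, hend, PySem.List.enumerate_nil]
    · have hj0 : j ≠ 0 := by omega
      by_cases hc : j % k = 0
      · have hp : k ≤ (j - 1) % k + 1 := hmod.1.mp hc
        have ih' := ih (j + 1) (by omega) (by simp at hlen ⊢; omega)
        rw [show j + 1 - 1 = j by ring, hc] at ih'
        norm_num at ih'
        simp [pvALoop, hp, hmm, hc, hj0, hend, ih']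
      · have hp : ¬ k ≤ (j - 1) % k + 1 := fun h => hc (hmod.1.mpr h)
        have ih' := ih (j + 1) (by omega) (by simp at hlen ⊢; omega)
        rw [show j + 1 - 1 = j by ring, hmod.2 hc] at ih'
        simp [pvALoop, hp, hmm, hc, hj0, hend, ih']

-- ===== VERDICT (by name: the statement is the Claim_ definition above) =====
theorem generate_thinned_list_py_spec : Claim_equal_generate_thinned_list_py := by
  intro k ys ake _dom hk
  unfold Pre_generate_thinned_list_py at hk
  unfold Spec_generate_thinned_list_py generate_thinned_list_py generate_thinned_list_py_alt
  cases ake with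
  | false =>
    have h := pvB_false k (ys.length : Int) hk ys 0 (le_refl 0)
    rw [Int.zero_emod, zero_add] at h
    simpa using h
  | true =>
    cases ys with
    | nil => simp [pvALoop, PySem.List.enumerate_nil]
    | cons y ys =>
      have h := pvB_true k ((y :: ys).length : Int) hk ys 1 (le_refl 1) (by simp; omega)
      have h1 : ((1 : Int) - 1) % k + 1 = 1 := by simp
      rw [h1] at h
      simp only [pvALoop, PySem.List.enumerate_cons]
      have hb0 : ((0 : Int) == 0) = true := by simp
      simp only [hb0, Bool.true_or, Bool.and_true, if_pos, List.filter_cons]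
      have hkeep : (PySem.Int.mod 0 k == 0 || (0 : Int) == ((y :: ys).length : Int) - 1) = true := by
        rw [PySem.Int.mod_eq_emod_of_pos hk]; simp
      simp only [hkeep, if_true, List.map_cons]
      exact congrArg (y :: ·) h
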